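-- pv_equiv track=rewrite | github.com/tanghaibao/goatools | goatools/grouper/aart_geneproducts_one.py | get_gene2section2gos
-- ===== SOURCE A (Python) =====
-- def get_gene2section2gos(gene2gos, sec2gos):
--     """Get a list of section aliases for each gene product ID."""
--     gene2section2gos = {}
--     for geneid, gos_gene in gene2gos.items():
--         section2gos = {}
--         for section_name, gos_sec in sec2gos.items():
--             gos_secgene = gos_gene.intersection(gos_sec)
--             if gos_secgene:
--                 section2gos[section_name] = gos_secgene
--         gene2section2gos[geneid] = section2gos
--     return gene2section2gos
-- ===== SOURCE B (Python) =====
-- def get_gene2section2gos(gene2gos, sec2gos):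
--     """Get a list of section aliases for each gene product ID."""
--     # Inverted index: GO id -> list of section names containing it (in sec2gos order).
--     go2sections = {}
--     for section_name, gos_sec in sec2gos.items():
--         for go in gos_sec:
--             go2sections.setdefault(go, []).append(section_name)
--     gene2section2gos = {}
--     for geneid, gos_gene in gene2gos.items():
--         acc = {}
--         for go in gos_gene:
--             for section_name in go2sections.get(go, ()):
--                 acc.setdefault(section_name, set()).add(go)
--         section2gos = {}
--         for section_name in sec2gos:
--             gos = acc.get(section_name)
--             if gos:
--                 section2gos[section_name] = gos
--         gene2section2gos[geneid] = section2gos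
--     return gene2section2gos
-- ===== Notes on version B (the rewrite author's own statement) =====
-- stated objective: faster
-- what changed: B builds an inverted GO->sections index once and, per gene, scans only the gene's own GOs to group them by section (emitting non-empty sections in sec2gos order), instead of A's per-gene intersection with every section's GO set.
import Mathlib
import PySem

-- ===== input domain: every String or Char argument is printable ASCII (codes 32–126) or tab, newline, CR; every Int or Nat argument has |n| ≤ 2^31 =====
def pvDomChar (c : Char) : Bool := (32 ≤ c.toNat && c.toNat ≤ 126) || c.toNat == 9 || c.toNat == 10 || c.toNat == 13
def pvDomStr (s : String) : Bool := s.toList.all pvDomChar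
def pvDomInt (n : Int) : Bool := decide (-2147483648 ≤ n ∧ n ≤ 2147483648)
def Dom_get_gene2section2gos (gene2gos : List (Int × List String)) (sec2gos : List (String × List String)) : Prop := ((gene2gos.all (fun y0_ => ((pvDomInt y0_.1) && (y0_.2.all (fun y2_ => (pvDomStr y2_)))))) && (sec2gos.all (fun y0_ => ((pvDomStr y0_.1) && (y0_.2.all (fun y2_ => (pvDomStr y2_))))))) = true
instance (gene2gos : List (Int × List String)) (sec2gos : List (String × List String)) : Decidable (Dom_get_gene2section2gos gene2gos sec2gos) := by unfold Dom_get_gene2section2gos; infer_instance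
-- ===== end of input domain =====

-- B replaces A's per-gene pass over every section (one intersection each) with an inverted
-- GO -> sections index built once; each gene then only touches the sections its own GOs occur in.

-- ===== PORT A =====
-- for geneid, gos_gene: for section_name, gos_sec: inter = gos_gene & gos_sec; if inter: keep it
def get_gene2section2gos (gene2gos : List (Int × List String)) (sec2gos : List (String × List String)) : List (Int × List (String × List String)) :=
  gene2gos.map (fun g =>
    let gosGene : PySem.Set String := PySem.Set.ofList g.2
    (g.1, sec2gos.foldl (fun acc p =>
            let gosSecgene := PySem.Set.inter gosGene (PySem.Set.ofList p.2)
            if !gosSecgene.isEmpty then acc ++ [(p.1, gosSecgene)] else acc) []))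

-- ===== PORT B =====
-- go2sections: GO id -> the section names containing it, in sec2gos order
def pvGoIndex (sec2gos : List (String × List String)) : PySem.Dict String (List String) :=
  sec2gos.foldl (fun d p =>
    (PySem.Set.ofList p.2).foldl (fun d go => d.modify go [] (· ++ [p.1])) d) PySem.Dict.empty

def get_gene2section2gos_alt (gene2gos : List (Int × List String)) (sec2gos : List (String × List String)) : List (Int × List (String × List String)) :=
  let go2sections := pvGoIndex sec2gos
  gene2gos.map (fun g =>
    -- acc: section name -> set of this gene's GOs hitting it, filled by scanning only g's GOs
    let acc : PySem.Dict String (List String) :=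
      (PySem.Set.ofList g.2).foldl (fun a go =>
        (go2sections.getD go []).foldl (fun a sn => a.modify sn [] (fun s => PySem.Set.add s go)) a)
        PySem.Dict.empty
    -- emit the non-empty sections in sec2gos order (Python: gos = acc.get(name); if gos: …)
    (g.1, sec2gos.foldl (fun out p =>
            let gos := acc.getD p.1 []
            if !gos.isEmpty then out ++ [(p.1, gos)] else out) []))

-- ===== PRECONDITION & SPEC =====
-- The association lists stand for Python dicts, whose keys are unique; Pre_ only states that
-- shape for sec2gos (a sec2gos list with a duplicate section key does not represent any Python
-- input to A, which receives sec2gos as a dict).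
def Pre_get_gene2section2gos (gene2gos : List (Int × List String)) (sec2gos : List (String × List String)) : Prop :=
  (sec2gos.map Prod.fst).Nodup
instance (gene2gos : List (Int × List String)) (sec2gos : List (String × List String)) : Decidable (Pre_get_gene2section2gos gene2gos sec2gos) := by unfold Pre_get_gene2section2gos; infer_instance

def pvWitness_get_gene2section2gos : (List (Int × List String)) × (List (String × List String)) :=
  ([(3, ["GO:1", "GO:2"]), (7, ["GO:2"])], [("sec a", ["GO:2", "GO:9"]), ("sec b", ["GO:3"])])

def Spec_get_gene2section2gos (gene2gos : List (Int × List String)) (sec2gos : List (String × List String)) (out : List (Int × List (String × List String))) : Prop := out = get_gene2section2gos_alt gene2gos sec2gos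
instance (gene2gos : List (Int × List String)) (sec2gos : List (String × List String)) (out : List (Int × List (String × List String))) : Decidable (Spec_get_gene2section2gos gene2gos sec2gos out) := by unfold Spec_get_gene2section2gos; infer_instance

-- ===== CLAIM (what is proved, stated in full; the proofs are below) =====
def Claim_equal_get_gene2section2gos : Prop := ∀ (gene2gos : List (Int × List String)) (sec2gos : List (String × List String)), Dom_get_gene2section2gos gene2gos sec2gos → Pre_get_gene2section2gos gene2gos sec2gos → Spec_get_gene2section2gos gene2gos sec2gos (get_gene2section2gos gene2gos sec2gos)

-- ===== LEMMAS AND PROOFS =====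

-- a Nodup list filtered on (· == a) is [a] or []
theorem filter_beq_nodup (l : List String) (h : l.Nodup) (a : String) :
    l.filter (fun x => x == a) = if a ∈ l then [a] else [] := by
  rw [List.filter_beq]
  rcases Nat.lt_or_ge (l.count a) 1 with hc | hc
  · have : l.count a = 0 := by omega
    simp [List.count_eq_zero.mp this, this]
  · have h1 : l.count a ≤ 1 := List.nodup_iff_count_le_one.mp h a
    have h2 : l.count a = 1 := by omega
    have h3 : a ∈ l := List.count_pos_iff.mp (by omega)
    simp [h2, h3]

-- folding `acc[sn'].add go` over a list of section names touches exactly the listed keys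
theorem getD_foldl_modify_add (l : List String) (go : String) (sn : String)
    (d : PySem.Dict String (List String)) :
    ((l.foldl (fun a sn' => a.modify sn' [] (fun s => PySem.Set.add s go)) d).getD sn []) =
      (if sn ∈ l then PySem.Set.add (d.getD sn []) go else d.getD sn []) := by
  induction l generalizing d with
  | nil => simp
  | cons sn' l ih =>
    simp only [List.foldl_cons, ih, PySem.Dict.getD_modify, List.mem_cons]
    by_cases h1 : sn = sn' <;> by_cases h2 : sn ∈ l <;>
      simp [h1, h2, PySem.Set.add_of_mem, PySem.Set.mem_add]

-- index lookup, accumulator generalized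
theorem goIndex_aux (l : List (String × List String)) (go : String)
    (d : PySem.Dict String (List String)) :
    ((l.foldl (fun d p => (PySem.Set.ofList p.2).foldl (fun d go => d.modify go [] (· ++ [p.1])) d) d).getD go []) =
      d.getD go [] ++ (l.filter (fun p => decide (go ∈ PySem.Set.ofList p.2))).map Prod.fst := by
  induction l generalizing d with
  | nil => simp
  | cons p l ih =>
    simp only [List.foldl_cons, ih]
    have hstep : ((PySem.Set.ofList p.2).foldl (fun d go => d.modify go [] (· ++ [p.1])) d).getD go []
        = d.getD go [] ++ (if go ∈ PySem.Set.ofList p.2 then [p.1] else []) := by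
      have := PySem.Dict.getD_foldl_modify_append ((PySem.Set.ofList p.2).map (fun g => (g, p.1))) d go
      rw [List.foldl_map] at this
      rw [this, List.filter_map]
      simp only [Function.comp_def]
      rw [filter_beq_nodup _ (PySem.Set.nodup_ofList p.2) go]
      by_cases h : go ∈ PySem.Set.ofList p.2 <;> simp [h]
    rw [hstep, List.filter_cons]
    by_cases h : go ∈ PySem.Set.ofList p.2
    · simp only [h, decide_true, if_pos, List.map_cons,
        List.append_assoc, List.singleton_append]
    · simp only [h, decide_false, if_neg, List.append_nil, Bool.false_eq_true,
        not_false_eq_true]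

-- index lookup: the sections whose GO set contains `go`, in sec2gos order
theorem pvGoIndex_getD (sec2gos : List (String × List String)) (go : String) :
    (pvGoIndex sec2gos).getD go [] =
      (sec2gos.filter (fun p => decide (go ∈ PySem.Set.ofList p.2))).map Prod.fst := by
  rw [pvGoIndex, goIndex_aux]
  simp

-- the per-gene double fold read at one key, accumulator generalized
theorem acc_aux (idx : PySem.Dict String (List String)) (sn : String)
    (l : List String) (d : PySem.Dict String (List String)) :
    ((l.foldl (fun a go => (idx.getD go []).foldl
        (fun a sn' => a.modify sn' [] (fun s => PySem.Set.add s go)) a) d).getD sn []) =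
      l.foldl (fun s go => if sn ∈ idx.getD go [] then PySem.Set.add s go else s) (d.getD sn []) := by
  induction l generalizing d with
  | nil => rfl
  | cons go l ih =>
    simp only [List.foldl_cons, ih, getD_foldl_modify_add]

-- the per-gene accumulator holds, at each real section, exactly A's intersection
theorem acc_getD (sec2gos : List (String × List String)) (hsec : (sec2gos.map Prod.fst).Nodup)
    (gos : List String) (p : String × List String) (hp : p ∈ sec2gos) :
    (((PySem.Set.ofList gos).foldl (fun a go =>
        ((pvGoIndex sec2gos).getD go []).foldl
          (fun a sn => a.modify sn [] (fun s => PySem.Set.add s go)) a)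
        PySem.Dict.empty).getD p.1 []) =
      PySem.Set.inter (PySem.Set.ofList gos) (PySem.Set.ofList p.2) := by
  rw [acc_aux, PySem.Dict.getD_empty,
    PySem.List.foldl_ite_eq_foldl_filter (fun go => p.1 ∈ (pvGoIndex sec2gos).getD go []) PySem.Set.add]
  rw [← PySem.Set.ofList_eq_foldl]
  rw [PySem.Set.ofList_eq_self_of_nodup _ ((PySem.Set.nodup_ofList gos).filter _)]
  have hmem : ∀ go, (p.1 ∈ (pvGoIndex sec2gos).getD go []) ↔ go ∈ PySem.Set.ofList p.2 := by
    intro go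
    rw [pvGoIndex_getD]
    simp only [List.mem_map, List.mem_filter]
    constructor
    · rintro ⟨q, ⟨hq, hgo⟩, hfst⟩
      have := List.inj_on_of_nodup_map hsec hq hp hfst
      subst this
      exact of_decide_eq_true hgo
    · intro h
      exact ⟨p, ⟨hp, decide_eq_true h⟩, rfl⟩
  show _ = List.filter _ _
  refine List.filter_congr (fun go hgo => ?_)
  rw [Bool.eq_iff_iff]
  simp [hmem go]

-- ===== VERDICT (by name: the statement is the Claim_ definition above) =====
theorem get_gene2section2gos_spec : Claim_equal_get_gene2section2gos := by
  intro gene2gos sec2gos _ hpre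
  unfold Spec_get_gene2section2gos get_gene2section2gos get_gene2section2gos_alt
  refine List.map_congr_left (fun g _ => ?_)
  refine Prod.ext rfl ?_
  refine PySem.List.foldl_congr_mem sec2gos _ _ _ (fun acc p hp => ?_)
  rw [acc_getD sec2gos hpre g.2 p hp]
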